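-- pv_equiv track=rewrite | github.com/hghyhghy/Codechef-Coding-Ninja | T29/4.py | min_subarray_sub_with_k
-- ===== SOURCE A (Python) =====
-- def min_subarray_sub_with_k(arr,k):
--
--     n=len(arr)
--
--     if k>n:
--
--         return None
--
--     min_value=float('inf')
--
--     for i in range(n-k+1):
--
--         total_sum=0
--
--         for j in range(i,i+k):
--
--             total_sum += arr[j]
--
--         min_value = min(min_value,total_sum)
--
--
--     return min_value
-- ===== SOURCE B (Python) =====
-- def min_subarray_sub_with_k(arr, k):
--     n = len(arr)
--     if k > n:
--         return None
--     if k <= 0: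
--         # every length-k window is empty, so every window sum is 0
--         return 0
--     s = sum(arr[:k])
--     best = s
--     for i in range(k, n):
--         s += arr[i] - arr[i - k]
--         if s < best:
--             best = s
--     return best
-- ===== Notes on version B (the rewrite author's own statement) =====
-- stated objective: faster
-- what changed: Replaces A's nested loop that re-sums each length-k window from scratch with a single-pass sliding-window running sum (add the incoming element, subtract the outgoing one), keeping a running minimum.
import Mathlib
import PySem

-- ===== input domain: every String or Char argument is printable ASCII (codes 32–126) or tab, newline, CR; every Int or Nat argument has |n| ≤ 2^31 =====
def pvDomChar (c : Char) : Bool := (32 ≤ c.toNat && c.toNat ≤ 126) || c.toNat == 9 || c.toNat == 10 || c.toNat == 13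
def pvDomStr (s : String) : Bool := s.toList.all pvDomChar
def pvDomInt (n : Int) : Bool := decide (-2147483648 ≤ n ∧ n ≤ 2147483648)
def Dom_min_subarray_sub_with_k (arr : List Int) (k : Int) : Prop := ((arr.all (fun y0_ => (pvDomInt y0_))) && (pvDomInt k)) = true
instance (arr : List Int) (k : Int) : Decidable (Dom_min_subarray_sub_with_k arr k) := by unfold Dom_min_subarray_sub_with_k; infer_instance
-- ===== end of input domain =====

-- B replaces A's O(n*k) recomputation of each window sum by an O(n) sliding-window
-- running sum (objective: faster, asymptotic).

-- ===== PORT A =====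
-- float('inf') is modelled as `none`; min(inf, t) = t.  Under k ≤ n the outer loop
-- runs at least once, so A's return value is always an int there (never inf).
def min_subarray_sub_with_k (arr : List Int) (k : Int) : Option Int :=
  let n : Int := arr.length
  if k > n then none
  else
    (PySem.List.pyRange 0 (n - k + 1) 1).foldl
      (fun min_value i =>
        let total_sum :=
          (PySem.List.pyRange i (i + k) 1).foldl
            (fun s j => s + PySem.List.pyGetD arr j 0) 0
        some (match min_value with
              | none => total_sum
              | some m => min m total_sum))
      none

-- ===== PORT B =====
-- sliding window: `inc` delivers the incoming element, `out` the outgoing one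
def slideMin : List Int → List Int → Int → Int → Int
  | [], _, _, best => best
  | _ :: _, [], _, best => best   -- unreachable: `inc` is a suffix of `out`
  | x :: inc, y :: out, s, best =>
      let s' := s + x - y
      slideMin inc out s' (min best s')

def min_subarray_sub_with_k_alt (arr : List Int) (k : Int) : Option Int :=
  let n : Int := arr.length
  if k > n then none
  else if k ≤ 0 then some 0
  else
    let kn := k.toNat
    let s := (arr.take kn).sum
    some (slideMin (arr.drop kn) arr s s)

-- ===== PRECONDITION & SPEC =====
def Spec_min_subarray_sub_with_k (arr : List Int) (k : Int) (out : Option Int) : Prop := out = min_subarray_sub_with_k_alt arr k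
instance (arr : List Int) (k : Int) (out : Option Int) : Decidable (Spec_min_subarray_sub_with_k arr k out) := by unfold Spec_min_subarray_sub_with_k; infer_instance

-- ===== CLAIM (what is proved, stated in full; the proofs are below) =====
def Claim_equal_min_subarray_sub_with_k : Prop := ∀ (arr : List Int) (k : Int), Dom_min_subarray_sub_with_k arr k → Spec_min_subarray_sub_with_k arr k (min_subarray_sub_with_k arr k)

-- ===== LEMMAS AND PROOFS =====

-- list of all length-kn window sums of l (empty when l is shorter than kn)
def wsums (kn : Nat) : List Int → List Int
  | [] => []
  | y :: ys => if kn ≤ ys.length + 1 then ((y :: ys).take kn).sum :: wsums kn ys else []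

theorem wsums_nil_of_lt (kn : Nat) (l : List Int) (h : l.length < kn) : wsums kn l = [] := by
  cases l with
  | nil => rfl
  | cons y ys => simp only [wsums]; rw [if_neg]; simp at h ⊢; omega

-- A's accumulator: once `some`, it folds `min` over the remaining values
theorem optfold_some {α : Type} (f : α → Int) :
    ∀ (l : List α) (a : Int),
      l.foldl (fun mv i => some (match mv with | none => f i | some m => min m (f i))) (some a)
        = some (l.foldl (fun m i => min m (f i)) a) := by
  intro l
  induction l with
  | nil => intro a; rfl
  | cons x xs ih => intro a; simp only [List.foldl_cons]; exact ih (min a (f x))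

-- A's inner loop enumerates exactly the window arr[i : i+kn]
theorem inner_map (arr : List Int) (kn : Nat) :
    ∀ i : Nat, i + kn ≤ arr.length →
      (PySem.List.pyRange (i : Int) ((i : Int) + (kn : Int)) 1).map
          (fun j => PySem.List.pyGetD arr j 0)
        = (arr.drop i).take kn := by
  induction kn with
  | zero =>
      intro i _
      rw [PySem.List.pyRange_one_eq_nil (by omega)]
      simp
  | succ m ih =>
      intro i hi
      have hlt : (i : Int) < (i : Int) + ((m : Nat) + 1 : Nat) := by push_cast; omega
      rw [PySem.List.pyRange_one_cons hlt]
      have hidx : i < arr.length := by omega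
      have hdrop : arr.drop i = arr[i] :: arr.drop (i + 1) := List.drop_eq_getElem_cons hidx
      simp only [List.map_cons]
      have h1 : ((i : Int) + 1) = ((i + 1 : Nat) : Int) := by push_cast; ring
      have h2 : ((i : Int) + ((m + 1 : Nat) : Int)) = ((i + 1 : Nat) : Int) + (m : Int) := by
        push_cast; ring
      rw [h1, h2, ih (i + 1) (by omega), hdrop, List.take_succ_cons]
      simp [PySem.List.pyGetD_natCast, List.getD_eq_getElem?_getD,
        List.getElem?_eq_getElem hidx]

-- window sums as a map over indices
theorem wsums_eq (kn : Nat) (hk : 0 < kn) :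
    ∀ (l : List Int), kn ≤ l.length →
      wsums kn l
        = (List.range (l.length - kn + 1)).map (fun i => ((l.drop i).take kn).sum) := by
  intro l
  induction l with
  | nil => intro h; simp at h; omega
  | cons y ys ih =>
      intro h
      simp only [wsums, List.length_cons]
      rw [if_pos (by simp at h ⊢; omega)]
      by_cases hy : kn ≤ ys.length
      · have hm : ys.length + 1 - kn + 1 = (ys.length - kn + 1) + 1 := by omega
        rw [hm, List.range_succ_eq_map]
        simp only [List.map_cons, List.map_map, List.drop_zero]
        rw [ih hy]
        exact congrArg _ (List.map_congr_left fun a _ => by simp [List.drop_succ_cons])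
      · have hys : ys.length < kn := by omega
        have h1 : ys.length + 1 - kn + 1 = 1 := by omega
        rw [h1]
        simp [List.range_succ, wsums_nil_of_lt kn ys hys]

-- the window sums of arr.tail, re-indexed over arr
theorem wsums_tail (arr : List Int) (kn : Nat) (hk : 0 < kn) (hle : kn ≤ arr.length) :
    wsums kn arr.tail
      = (List.range (arr.length - kn)).map (fun j => ((arr.drop (j + 1)).take kn).sum) := by
  cases arr with
  | nil => simp at hle; omega
  | cons a t =>
      by_cases ht : kn ≤ t.length
      · simp only [List.tail_cons]
        rw [wsums_eq kn hk t ht]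
        have : t.length - kn + 1 = (a :: t).length - kn := by simp; omega
        rw [this]
        apply List.map_congr_left
        intro j _
        simp [List.drop_succ_cons]
      · have h1 : (a :: t).length - kn = 0 := by simp at hle ⊢; omega
        rw [h1]
        simp [wsums_nil_of_lt kn t (by omega)]

-- sum of an Int take, one step
theorem sum_take_succ_int (l : List Int) (i : Nat) (h : i < l.length) :
    (l.take (i + 1)).sum = (l.take i).sum + l[i] := by
  induction l generalizing i with
  | nil => simp at h
  | cons a t ih =>
      cases i with
      | zero => simp
      | succ j =>
          simp only [List.take_succ_cons, List.sum_cons, List.getElem_cons_succ]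
          rw [ih j (by simpa using h)]
          omega

-- the sliding window visits exactly the window sums
theorem slide_eq (kn : Nat) (hk : 0 < kn) :
    ∀ (ys : List Int), kn ≤ ys.length → ∀ best,
      slideMin (ys.drop kn) ys ((ys.take kn).sum) best
        = (wsums kn ys.tail).foldl min best := by
  obtain ⟨m, rfl⟩ : ∃ m, kn = m + 1 := ⟨kn - 1, by omega⟩
  intro ys
  induction ys with
  | nil => intro h; simp at h
  | cons y ys' ih =>
      intro h best
      by_cases hy : m + 1 ≤ ys'.length
      · have hlt : m < ys'.length := by omega
        have hdrop : (y :: ys').drop (m + 1) = ys'[m] :: ys'.drop (m + 1) := by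
          rw [List.drop_succ_cons, List.drop_eq_getElem_cons hlt]
        rw [hdrop]
        simp only [slideMin]
        have hs' : ((y :: ys').take (m + 1)).sum + ys'[m] - y = (ys'.take (m + 1)).sum := by
          rw [List.take_succ_cons, List.sum_cons, sum_take_succ_int ys' m hlt]
          ring
        rw [hs', ih hy (min best (ys'.take (m + 1)).sum)]
        have hw : wsums (m + 1) (y :: ys').tail
            = (ys'.take (m + 1)).sum :: wsums (m + 1) ys'.tail := by
          simp only [List.tail_cons]
          cases ys' with
          | nil => simp at hy
          | cons z zs =>
              simp only [wsums]
              rw [if_pos (by simp at hy ⊢; omega)]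
              simp
        rw [hw, List.foldl_cons]
      · have hdrop : (y :: ys').drop (m + 1) = [] := by
          apply List.drop_eq_nil_of_le
          simp at h ⊢; omega
        rw [hdrop]
        simp only [slideMin, List.tail_cons]
        rw [wsums_nil_of_lt (m + 1) ys' (by omega)]
        rfl

-- fold of the constant 0 stays 0
theorem foldl_min_zero (l : List Int) : l.foldl (fun (m : Int) (_ : Int) => min m 0) 0 = 0 := by
  induction l with
  | nil => rfl
  | cons x xs ih => simpa using ih

-- ===== VERDICT (by name: the statement is the Claim_ definition above) =====
theorem min_subarray_sub_with_k_spec : Claim_equal_min_subarray_sub_with_k := by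
  intro arr k _
  unfold Spec_min_subarray_sub_with_k min_subarray_sub_with_k min_subarray_sub_with_k_alt
  simp only []
  by_cases hkn : k > (arr.length : Int)
  · rw [if_pos hkn, if_pos hkn]
  rw [if_neg hkn, if_neg hkn]
  by_cases hk0 : k ≤ 0
  · -- every window is empty: A folds min over constant 0, B returns 0
    rw [if_pos hk0]
    have hfe : (fun (min_value : Option Int) (i : Int) =>
        some (match min_value with
              | none => (PySem.List.pyRange i (i + k) 1).foldl
                          (fun s j => s + PySem.List.pyGetD arr j 0) 0
              | some m => min m ((PySem.List.pyRange i (i + k) 1).foldl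
                          (fun s j => s + PySem.List.pyGetD arr j 0) 0)))
        = (fun (min_value : Option Int) (i : Int) =>
        some (match min_value with
              | none => (0 : Int)
              | some m => min m 0)) := by
      funext mv i
      rw [PySem.List.pyRange_one_eq_nil (by omega)]
      rfl
    rw [hfe]
    have hnn : (0 : Int) < (arr.length : Int) - k + 1 := by omega
    rw [PySem.List.pyRange_one_cons (by omega : (0:Int) < (arr.length : Int) - k + 1)]
    rw [List.foldl_cons]
    have := optfold_some (fun (_ : Int) => (0 : Int))
      (PySem.List.pyRange (0 + 1) ((arr.length : Int) - k + 1) 1) 0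
    simp only [] at this
    rw [this, foldl_min_zero]
  · -- k > 0: both sides are the fold of min over the list of window sums
    rw [if_neg hk0]
    have hkpos : 0 < k := by omega
    set kn := k.toNat with hknd
    have hk1 : 0 < kn := by omega
    have hle : kn ≤ arr.length := by omega
    have hkc : (kn : Int) = k := by omega
    -- A side
    have hb : (arr.length : Int) - k + 1 = ((arr.length - kn + 1 : Nat) : Int) := by
      push_cast; omega
    rw [hb, PySem.List.pyRange_zero_natCast]
    rw [List.foldl_map]
    -- replace the inner loop total by the window sum, on range members
    have hcong := PySem.List.foldl_congr_mem
      (l := List.range (arr.length - kn + 1))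
      (f := fun (mv : Option Int) (i : Nat) =>
        some (match mv with
              | none => (PySem.List.pyRange (i : Int) ((i : Int) + k) 1).foldl
                          (fun s j => s + PySem.List.pyGetD arr j 0) 0
              | some m => min m ((PySem.List.pyRange (i : Int) ((i : Int) + k) 1).foldl
                          (fun s j => s + PySem.List.pyGetD arr j 0) 0)))
      (g := fun (mv : Option Int) (i : Nat) =>
        some (match mv with
              | none => ((arr.drop i).take kn).sum
              | some m => min m ((arr.drop i).take kn).sum))
      (init := (none : Option Int))
      (by
        intro acc i hi
        have hi' : i + kn ≤ arr.length := by
          simp [List.mem_range] at hi; omega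
        have htot : (PySem.List.pyRange (i : Int) ((i : Int) + k) 1).foldl
            (fun s j => s + PySem.List.pyGetD arr j 0) 0 = ((arr.drop i).take kn).sum := by
          rw [PySem.List.foldl_add]
          rw [← hkc, inner_map arr kn i hi']
          simp
        simp only [htot])
    rw [hcong]
    -- peel the first iteration, then fold min
    have hm : arr.length - kn + 1 = (arr.length - kn) + 1 := rfl
    rw [List.range_succ_eq_map, List.foldl_cons, List.foldl_map]
    have := optfold_some (fun (i : Nat) => ((arr.drop (i + 1)).take kn).sum)
      (List.range (arr.length - kn)) ((arr.drop 0).take kn).sum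
    simp only [Nat.succ_eq_add_one] at this ⊢
    rw [this]
    -- B side
    rw [slide_eq kn hk1 arr hle, wsums_tail arr kn hk1 hle, List.foldl_map]
    simp
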